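-- pv_equiv track=rewrite | github.com/TheMathGenius01/Computer_Science_1 | Python/07_iteration/loops_projects/nestedloops_project.py | reverse_diamond
-- ===== SOURCE A (Python) =====
-- def reverse_diamond(N):
--     """
--     returns the shape as shown below if N == 5
--     1 3 5 7 9 9 7 5 3 1
--     3 5 7 9     9 7 5 3
--     5 7 9         9 7 5
--     7 9             9 7
--     9                 9
--     9                 9
--     7 9             9 7
--     5 7 9         9 7 5
--     3 5 7 9     9 7 5 3
--     1 3 5 7 9 9 7 5 3 1
--     """
--     #todo
--     strnt = ""
--     strnb = ""
--     space = 0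
--     for i in range(1, N*2, 2):
--         for j in range(i, N*2, 2):
--             strnt += str(j) + " "
--         strnt += space * " "
--         for k in range(N*2-1, i-1, -2):
--             strnt += str(k) + " "
--         strnt = strnt.rstrip()
--         strnt += "\n"
--         space += 4
--
--     for i in range(N*2-1, 0, -2):
--         space -= 4
--         for j in range(i, N*2+1, 2):
--             strnb += str(j) + " "
--         strnb += space * " "
--         for k in range(N*2-1, i-1, -2):
--             strnb += str(k) + " "
--         strnb = strnb.rstrip()
--         strnb += "\n"
--     strnb = strnb.rstrip()
--     return strnt + strnb
-- ===== SOURCE B (Python) =====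
-- def reverse_diamond(N):
--     # one pass builds the top-half rows; the bottom half is their mirror
--     rows = []
--     for i in range(1, N * 2, 2):
--         asc = "".join(str(j) + " " for j in range(i, N * 2, 2))
--         desc = "".join(str(k) + " " for k in range(N * 2 - 1, i - 1, -2))
--         rows.append((asc + 2 * (i - 1) * " " + desc).rstrip())
--     return "\n".join(rows + rows[::-1])
-- ===== Notes on version B (the rewrite author's own statement) =====
-- stated objective: alternative
-- what changed: Replaces A's two independent accumulating loops (top and bottom, each re-generating every line into one growing string with a running space counter) by a single pass that builds the list of top-half rows with the padding width computed directly from the row's starting number, and obtains the bottom half as the reversed row list, joined once with newlines.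
import Mathlib
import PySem

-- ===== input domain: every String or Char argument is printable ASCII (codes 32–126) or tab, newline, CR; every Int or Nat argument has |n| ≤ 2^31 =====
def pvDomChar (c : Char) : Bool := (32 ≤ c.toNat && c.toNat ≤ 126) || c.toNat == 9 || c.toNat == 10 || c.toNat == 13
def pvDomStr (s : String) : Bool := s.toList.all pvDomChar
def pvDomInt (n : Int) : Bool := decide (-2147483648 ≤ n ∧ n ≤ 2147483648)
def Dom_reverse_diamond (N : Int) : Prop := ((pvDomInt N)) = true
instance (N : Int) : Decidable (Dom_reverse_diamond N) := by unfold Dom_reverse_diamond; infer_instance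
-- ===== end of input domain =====

-- B builds the list of top-half rows in one pass and mirrors it for the bottom half (alternative decomposition, same cost).


-- shared primitive: Python's `n * " "` (a non-positive count gives the empty string; exact)
def pvSpaces (n : Int) : List Char := List.replicate n.toNat ' '

-- ===== PORT A =====
-- body of A's first (top-half) loop: two inner number loops, the padding, rstrip of the whole accumulated string, newline, space += 4
def pvStepT (N : Int) (st : List Char × Int) (i : Int) : List Char × Int :=
  let s1 := (PySem.List.pyRange i (N*2) 2).foldl (fun s j => s ++ (PySem.Int.toChars j ++ [' '])) st.1
  let s2 := s1 ++ pvSpaces st.2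
  let s3 := (PySem.List.pyRange (N*2-1) (i-1) (-2)).foldl (fun s k => s ++ (PySem.Int.toChars k ++ [' '])) s2
  (PySem.Chars.rstrip s3 ++ ['\n'], st.2 + 4)

-- body of A's second (bottom-half) loop: space -= 4 first, ascending loop runs to N*2+1
def pvStepB (N : Int) (st : List Char × Int) (i : Int) : List Char × Int :=
  let space := st.2 - 4
  let s1 := (PySem.List.pyRange i (N*2+1) 2).foldl (fun s j => s ++ (PySem.Int.toChars j ++ [' '])) st.1
  let s2 := s1 ++ pvSpaces space
  let s3 := (PySem.List.pyRange (N*2-1) (i-1) (-2)).foldl (fun s k => s ++ (PySem.Int.toChars k ++ [' '])) s2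
  (PySem.Chars.rstrip s3 ++ ['\n'], space)

def reverse_diamond (N : Int) : String :=
  let top := (PySem.List.pyRange 1 (N*2) 2).foldl (pvStepT N) (([] : List Char), (0 : Int))
  let bot := (PySem.List.pyRange (N*2-1) 0 (-2)).foldl (pvStepB N) (([] : List Char), top.2)
  String.ofList (top.1 ++ PySem.Chars.rstrip bot.1)

-- ===== PORT B =====
def pvAsc (N i : Int) : List Char :=
  (PySem.List.pyRange i (N*2) 2).flatMap (fun j => PySem.Int.toChars j ++ [' '])

def pvDesc (N i : Int) : List Char :=
  (PySem.List.pyRange (N*2-1) (i-1) (-2)).flatMap (fun k => PySem.Int.toChars k ++ [' '])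

def pvRow (N i : Int) : List Char :=
  PySem.Chars.rstrip (pvAsc N i ++ pvSpaces (2*(i-1)) ++ pvDesc N i)

def reverse_diamond_alt (N : Int) : String :=
  let rows := (PySem.List.pyRange 1 (N*2) 2).map (pvRow N)
  String.ofList (PySem.Chars.join ['\n'] (rows ++ rows.reverse))

-- ===== PRECONDITION & SPEC =====
def Spec_reverse_diamond (N : Int) (out : String) : Prop := out = reverse_diamond_alt N
instance (N : Int) (out : String) : Decidable (Spec_reverse_diamond N out) := by unfold Spec_reverse_diamond; infer_instance

-- ===== CLAIM (what is proved, stated in full; the proofs are below) =====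
def Claim_equal_reverse_diamond : Prop := ∀ (N : Int), Dom_reverse_diamond N → Spec_reverse_diamond N (reverse_diamond N)

-- ===== LEMMAS AND PROOFS =====

theorem digitChar_star {m : Nat} (h : 16 ≤ m) : Nat.digitChar m = '*' := by
  simp only [Nat.digitChar]
  repeat rw [if_neg (by omega)]

theorem digitChar_bound (m : Nat) : 33 ≤ (Nat.digitChar m).toNat ∧ (Nat.digitChar m).toNat ≤ 126 := by
  rcases Nat.lt_or_ge m 16 with h | h
  · interval_cases m <;> decide
  · rw [digitChar_star h]; decide

theorem isspace_false_of_bound (c : Char) (h1 : 33 ≤ c.toNat) (h2 : c.toNat ≤ 126) :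
    PySem.Chars.isspace c = false := by
  simp [PySem.Chars.isspace]; omega

theorem toDigitsCore_mem (b : Nat) : ∀ (f n : Nat) (ds : List Char) (c : Char),
    c ∈ Nat.toDigitsCore b f n ds → c ∈ ds ∨ ∃ m, c = Nat.digitChar m := by
  intro f
  induction f with
  | zero => intro n ds c h; simp [Nat.toDigitsCore] at h; exact Or.inl h
  | succ f ih =>
    intro n ds c h
    rw [Nat.toDigitsCore] at h
    by_cases h0 : n / b = 0
    · simp [h0] at h
      rcases h with h | h
      · exact Or.inr ⟨n % b, h⟩
      · exact Or.inl h
    · simp [h0] at h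
      rcases ih _ _ _ h with h' | h'
      · rcases List.mem_cons.mp h' with h2 | h2
        · exact Or.inr ⟨n % b, h2⟩
        · exact Or.inl h2
      · exact Or.inr h'

theorem toDigitsCore_ne_nil (b : Nat) : ∀ (f n : Nat) (ds : List Char), (ds ≠ [] ∨ 0 < f) →
    Nat.toDigitsCore b f n ds ≠ [] := by
  intro f
  induction f with
  | zero => intro n ds h; simp [Nat.toDigitsCore]; rcases h with h | h; exact h; omega
  | succ f ih =>
    intro n ds h
    rw [Nat.toDigitsCore]
    by_cases h0 : n / b = 0
    · simp [h0]
    · simp [h0]; exact ih _ _ (Or.inl (by simp))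

theorem toChars_hasNonspace (j : Int) :
    ∃ c ∈ PySem.Int.toChars j, PySem.Chars.isspace c = false := by
  unfold PySem.Int.toChars
  split
  · exact ⟨'-', List.mem_cons_self, by decide⟩
  · have hne : Nat.toDigits 10 j.toNat ≠ [] :=
      toDigitsCore_ne_nil 10 (j.toNat + 1) j.toNat [] (Or.inr (by omega))
    obtain ⟨c, t, hct⟩ := List.exists_cons_of_ne_nil hne
    refine ⟨c, by simp [hct], ?_⟩
    have hmem : c ∈ Nat.toDigits 10 j.toNat := by simp [hct]
    rcases toDigitsCore_mem 10 _ _ _ _ hmem with h | ⟨m, hm⟩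
    · simp at h
    · subst hm
      exact isspace_false_of_bound _ (digitChar_bound m).1 (digitChar_bound m).2

theorem rstrip_eq_nil_iff (l : List Char) :
    PySem.Chars.rstrip l = [] ↔ ∀ c ∈ l, PySem.Chars.isspace c = true := by
  simp [PySem.Chars.rstrip, List.dropWhile_eq_nil_iff]

theorem rstrip_append_of_ne_nil (a b : List Char) (h : PySem.Chars.rstrip b ≠ []) :
    PySem.Chars.rstrip (a ++ b) = a ++ PySem.Chars.rstrip b := by
  have hd : (List.dropWhile PySem.Chars.isspace b.reverse) ≠ [] := by
    intro he; apply h; simp [PySem.Chars.rstrip, he]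
  simp [PySem.Chars.rstrip, List.reverse_append, List.dropWhile_append,
    List.isEmpty_iff, hd]

theorem rstrip_append_newline (x : List Char) :
    PySem.Chars.rstrip (x ++ ['\n']) = PySem.Chars.rstrip x := by
  simp [PySem.Chars.rstrip, List.reverse_append, List.dropWhile_cons_of_pos,
    (by decide : PySem.Chars.isspace '\n' = true)]

theorem rstrip_idem (l : List Char) :
    PySem.Chars.rstrip (PySem.Chars.rstrip l) = PySem.Chars.rstrip l := by
  simp only [PySem.Chars.rstrip, List.reverse_reverse]
  congr 1
  cases h : List.dropWhile PySem.Chars.isspace l.reverse with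
  | nil => simp
  | cons a t =>
    have ha : PySem.Chars.isspace a = false := by
      have := List.head_dropWhile_not (p := PySem.Chars.isspace) (l := l.reverse) (by simp [h])
      simpa [h] using this
    simp [ha]

theorem topRange_eq (N : Int) :
    PySem.List.pyRange 1 (N*2) 2 = (List.range N.toNat).map (fun (k : Nat) => 1 + 2*(k:Int)) := by
  rw [PySem.List.pyRange_of_pos _ _ (by norm_num)]
  rw [show (if (1:Int) < N*2 then ((N*2 - 1 + 2 - 1)/2).toNat else 0) = N.toNat by
    split <;> omega]

theorem botRange_eq (N : Int) :
    PySem.List.pyRange (N*2-1) 0 (-2) = (List.range N.toNat).map (fun (k : Nat) => N*2-1 - 2*(k:Int)) := by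
  rw [PySem.List.pyRange_of_neg _ _ (by norm_num)]
  simp only [neg_neg]
  rw [show (if (0:Int) < N*2-1 then ((N*2 - 1 - 0 + 2 - 1)/2).toNat else 0) = N.toNat by
    split <;> omega]
  apply List.map_congr_left
  intro k _; ring

theorem ascRange_eq (N m : Int) :
    PySem.List.pyRange (2*m+1) (N*2+1) 2 = PySem.List.pyRange (2*m+1) (N*2) 2 := by
  rw [PySem.List.pyRange_of_pos _ _ (by norm_num), PySem.List.pyRange_of_pos _ _ (by norm_num)]
  rw [show (if (2*m+1:Int) < N*2+1 then ((N*2+1 - (2*m+1) + 2 - 1)/2).toNat else 0)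
        = (if (2*m+1:Int) < N*2 then ((N*2 - (2*m+1) + 2 - 1)/2).toNat else 0) by
    split <;> split <;> omega]

theorem rev_map_range {α : Type} (f : Nat → α) (n : Nat) :
    ((List.range n).map f).reverse = (List.range n).map (fun k => f (n-1-k)) := by
  induction n generalizing f with
  | zero => simp
  | succ n ih =>
    conv_lhs => rw [List.range_succ]
    conv_rhs => rw [List.range_succ_eq_map]
    simp only [List.map_append, List.map_cons, List.reverse_append, List.map_map,
      List.reverse_cons, List.map_nil, List.reverse_nil, List.nil_append, List.cons_append]
    rw [ih]
    simp only [Nat.add_sub_cancel, Nat.sub_zero]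
    refine List.cons_eq_cons.mpr ⟨rfl, ?_⟩
    apply List.map_congr_left
    intro k hk
    simp at hk
    simp [Function.comp]
    congr 1
    omega

theorem mem_pyRange_self (i b : Int) (h : i < b) : i ∈ PySem.List.pyRange i b 2 := by
  rw [PySem.List.pyRange_of_pos _ _ (by norm_num)]
  rw [if_pos h]
  refine List.mem_map.mpr ⟨0, ?_, by simp⟩
  simp only [List.mem_range]
  omega

theorem rstrip_body_ne (N i sp : Int) (h : i < N*2) :
    PySem.Chars.rstrip (pvAsc N i ++ pvSpaces sp ++ pvDesc N i) ≠ [] := by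
  obtain ⟨c, hc, hns⟩ := toChars_hasNonspace i
  intro hnil
  rw [rstrip_eq_nil_iff] at hnil
  have hmem : c ∈ pvAsc N i := by
    unfold pvAsc
    exact List.mem_flatMap.mpr ⟨i, mem_pyRange_self i (N*2) h, by simp [hc]⟩
  have := hnil c (by simp [hmem])
  simp [this] at hns

theorem pvRow_ne_nil (N i : Int) (h : i < N*2) : pvRow N i ≠ [] :=
  rstrip_body_ne N i _ h

theorem joinL (c : Char) (ss ts : List (List Char)) (h : ts ≠ []) :
    PySem.Chars.join [c] (ss ++ ts) =
      ss.flatMap (fun r => r ++ [c]) ++ PySem.Chars.join [c] ts := by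
  induction ss with
  | nil => simp
  | cons a ss ih =>
    have hne : ss ++ ts ≠ [] := by simp [h]
    obtain ⟨b, l, hb⟩ := List.exists_cons_of_ne_nil hne
    calc PySem.Chars.join [c] (a :: (ss ++ ts))
        = a ++ [c] ++ PySem.Chars.join [c] (ss ++ ts) := by
          rw [hb]; exact PySem.Chars.join_cons_cons ..
      _ = _ := by rw [ih]; simp

theorem strip_flatMap (ss : List (List Char)) (last : List Char)
    (h1 : PySem.Chars.rstrip last = last) (h2 : last ≠ []) :
    PySem.Chars.rstrip ((ss ++ [last]).flatMap (fun r => r ++ ['\n'])) =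
      PySem.Chars.join ['\n'] (ss ++ [last]) := by
  rw [List.flatMap_append, joinL _ _ _ (by simp)]
  simp only [List.flatMap_cons, List.flatMap_nil, List.append_nil]
  rw [rstrip_append_of_ne_nil _ _ (by rw [rstrip_append_newline, h1]; exact h2)]
  rw [rstrip_append_newline, h1]
  rw [PySem.Chars.join_singleton]

theorem topFold (N : Int) : ∀ (n : Nat), (n:Int) ≤ N →
    ((List.range n).map (fun (k:Nat) => 1 + 2*(k:Int))).foldl (pvStepT N) ([], 0) =
      ((List.range n).flatMap (fun (k:Nat) => pvRow N (1 + 2*(k:Int)) ++ ['\n']), 4*(n:Int)) := by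
  intro n
  induction n with
  | zero => intro _; simp
  | succ n ih =>
    intro hn
    have hn' : (n:Int) ≤ N := by push_cast at hn ⊢; omega
    rw [List.range_succ, List.map_append, List.foldl_append, ih hn', List.flatMap_append]
    simp only [List.map_cons, List.map_nil, List.foldl_cons, List.foldl_nil,
      List.flatMap_cons, List.flatMap_nil, List.append_nil]
    have hlt : (1 + 2*(n:Int)) < N*2 := by push_cast at hn; omega
    have hb := rstrip_body_ne N (1 + 2*(n:Int)) (4*(n:Int)) hlt
    unfold pvStepT pvRow
    simp only
    rw [show (2*((1 + 2*(n:Int))-1)) = 4*(n:Int) by ring]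
    unfold pvAsc pvDesc at hb ⊢
    simp only [PySem.List.foldl_append_eq_flatMap, List.append_assoc] at hb ⊢
    rw [rstrip_append_of_ne_nil _ _ hb]
    simp only [Prod.mk.injEq]
    constructor
    · simp
    · push_cast; ring

theorem botFold (N : Int) (hN : 1 ≤ N) : ∀ (n : Nat), (n:Int) ≤ N →
    ((List.range n).map (fun (k:Nat) => N*2-1 - 2*(k:Int))).foldl (pvStepB N) ([], 4*N) =
      ((List.range n).flatMap (fun (k:Nat) => pvRow N (N*2-1 - 2*(k:Int)) ++ ['\n']), 4*N - 4*(n:Int)) := by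
  intro n
  induction n with
  | zero => intro _; simp
  | succ n ih =>
    intro hn
    have hn' : (n:Int) ≤ N := by push_cast at hn ⊢; omega
    rw [List.range_succ, List.map_append, List.foldl_append, ih hn', List.flatMap_append]
    simp only [List.map_cons, List.map_nil, List.foldl_cons, List.foldl_nil,
      List.flatMap_cons, List.flatMap_nil, List.append_nil]
    have hlt : (N*2-1 - 2*(n:Int)) < N*2 := by omega
    have hb := rstrip_body_ne N (N*2-1 - 2*(n:Int)) (4*N - 4*(n:Int) - 4) hlt
    unfold pvStepB pvRow
    simp only
    rw [show (N*2-1 - 2*(n:Int)) = 2*(N-1-(n:Int))+1 from by ring, ascRange_eq N (N-1-(n:Int)),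
        show (2*(N-1-(n:Int))+1) = N*2-1 - 2*(n:Int) from by ring]
    rw [show (2*((N*2-1 - 2*(n:Int))-1)) = 4*N - 4*(n:Int) - 4 by ring]
    unfold pvAsc pvDesc at hb ⊢
    simp only [PySem.List.foldl_append_eq_flatMap, List.append_assoc] at hb ⊢
    rw [show (4*N - 4*(n:Int)) - 4 = 4*N - 4*((n:Int)+1) by ring] at hb ⊢
    rw [rstrip_append_of_ne_nil _ _ hb]
    simp only [Prod.mk.injEq]
    constructor
    · simp
    · push_cast; ring

-- ===== VERDICT (by name: the statement is the Claim_ definition above) =====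
theorem reverse_diamond_spec : Claim_equal_reverse_diamond := by
  intro N _
  unfold Spec_reverse_diamond reverse_diamond reverse_diamond_alt
  by_cases hN : 1 ≤ N
  case neg =>
    have h1 : PySem.List.pyRange 1 (N*2) 2 = [] := by
      rw [topRange_eq]; have : N.toNat = 0 := by omega
      simp [this]
    have h2 : PySem.List.pyRange (N*2-1) 0 (-2) = [] := by
      rw [botRange_eq]; have : N.toNat = 0 := by omega
      simp [this]
    simp [h1, h2, PySem.Chars.rstrip]
  case pos =>
    have h0 : (0:Int) ≤ N := by omega
    have hNt : ((N.toNat : Nat) : Int) = N := Int.toNat_of_nonneg h0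
    rw [topRange_eq, botRange_eq]
    rw [topFold N N.toNat (by omega)]
    simp only [hNt]
    rw [botFold N hN N.toNat (by rw [hNt])]
    have hf : ∀ (k : Nat), (fun (k : Nat) => pvRow N (1 + 2*(k:Int))) k = pvRow N (1 + 2*(k:Int)) :=
      fun _ => rfl
    obtain ⟨m, hm⟩ : ∃ m, N.toNat = m + 1 := ⟨N.toNat - 1, by omega⟩
    have hrows : (List.range N.toNat).map (fun (k : Nat) => pvRow N (1 + 2*(k:Int)))
        = pvRow N 1 :: (List.range m).map ((fun (k : Nat) => pvRow N (1 + 2*(k:Int))) ∘ (· + 1)) := by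
      rw [hm, List.range_succ_eq_map, List.map_cons, List.map_map]
      norm_num
    have hrev : ((List.range N.toNat).map (fun (k : Nat) => pvRow N (1 + 2*(k:Int)))).reverse
        = ((List.range m).map ((fun (k : Nat) => pvRow N (1 + 2*(k:Int))) ∘ (· + 1))).reverse ++ [pvRow N 1] := by
      rw [hrows, List.reverse_cons]
    have hbotrows : (List.range N.toNat).flatMap (fun (k:Nat) => pvRow N (N*2-1 - 2*(k:Int)) ++ ['\n'])
        = (((List.range N.toNat).map (fun (k : Nat) => pvRow N (1 + 2*(k:Int)))).reverse).flatMap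
            (fun r => r ++ ['\n']) := by
      rw [rev_map_range (fun (k : Nat) => pvRow N (1 + 2*(k:Int))) N.toNat, List.flatMap_map]
      apply List.flatMap_congr
      intro k hk
      simp only [List.mem_range] at hk
      congr 2
      omega
    have hT : (List.range N.toNat).flatMap (fun (k:Nat) => pvRow N (1 + 2*(k:Int)) ++ ['\n'])
        = ((List.range N.toNat).map (fun (k : Nat) => pvRow N (1 + 2*(k:Int)))).flatMap
            (fun r => r ++ ['\n']) := by
      rw [List.flatMap_map]
    have hrows0 : ((List.range N.toNat).map (fun (k:Nat) => 1 + 2*(k:Int))).map (pvRow N)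
        = (List.range N.toNat).map (fun (k : Nat) => pvRow N (1 + 2*(k:Int))) := by
      rw [List.map_map]; rfl
    have h1 : PySem.Chars.rstrip (pvRow N 1) = pvRow N 1 := by
      rw [pvRow]; exact rstrip_idem _
    have h2 : pvRow N 1 ≠ [] := pvRow_ne_nil N 1 (by omega)
    have hne : ((List.range N.toNat).map (fun (k : Nat) => pvRow N (1 + 2*(k:Int)))).reverse ≠ [] := by
      rw [hrev]; simp
    rw [hT, hbotrows, hrev, strip_flatMap _ _ h1 h2, ← hrev, hrows0,
        joinL '\n' _ _ hne]
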